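-- pv_equiv track=rewrite | github.com/ahmed-farahat-pro/python-agent | mst.py | mst_traversal_order
-- ===== SOURCE A (Python) =====
-- from collections import defaultdict
--
-- def mst_traversal_order(mst_edges: list, start: tuple, all_nodes: list) -> list:
--     """Generate a DFS traversal order of the MST starting from a given node.
--
--     Converts MST edges into an adjacency list and performs DFS to determine
--     the order in which nodes should be visited.
--
--     Args:
--         mst_edges: List of (weight, node1, node2) from compute_mst.
--         start: (row, col) starting position for traversal.
--         all_nodes: All nodes in the MST.
--
--     Returns:
--         List of (row, col) positions in DFS visitation order.
--     """
--     if not mst_edges: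
--         return [start] if start in all_nodes else list(all_nodes)
--
--     # Build adjacency list
--     adj = defaultdict(list)
--     for weight, n1, n2 in mst_edges:
--         adj[n1].append((weight, n2))
--         adj[n2].append((weight, n1))
--
--     # DFS traversal
--     visited = set()
--     order = []
--
--     def dfs(node):
--         visited.add(node)
--         order.append(node)
--         # Sort neighbors by weight for deterministic order
--         for weight, neighbor in sorted(adj[node]):
--             if neighbor not in visited:
--                 dfs(neighbor)
--
--     dfs(start)
--
--     # Add any disconnected nodes
--     for node in all_nodes:
--         if node not in visited:
--             order.append(node)
--
--     return order
-- ===== SOURCE B (Python) =====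
-- def mst_traversal_order(mst_edges: list, start: tuple, all_nodes: list) -> list:
--     """Dict-free iterative DFS: no adjacency structure is built; the incident
--     edges of the current node are collected by scanning mst_edges when it is
--     visited.  An explicit stack replaces the recursion (neighbors pushed in
--     reverse sorted order, visited checked at pop time), giving the same
--     pre-order as the recursive version."""
--     if not mst_edges:
--         return [start] if start in all_nodes else list(all_nodes)
--
--     visited = set()
--     order = []
--     stack = [start]
--     while stack:
--         node = stack.pop()
--         if node in visited:
--             continue
--         visited.add(node)
--         order.append(node)
--         nbrs = []
--         for w, a, b in mst_edges:
--             if a == node: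
--                 nbrs.append((w, b))
--             if b == node:
--                 nbrs.append((w, a))
--         nbrs.sort()
--         for pair in reversed(nbrs):
--             stack.append(pair[1])
--
--     return order + [n for n in all_nodes if n not in visited]
-- ===== Notes on version B (the rewrite author's own statement) =====
-- stated objective: alternative
-- what changed: B builds no adjacency dict at all: an explicit-stack DFS scans mst_edges for the popped node's incident edges, sorts them, pushes them in reverse order and checks visited at pop time; the trailing disconnected-node pass becomes a filter appended to the order.
import Mathlib
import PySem

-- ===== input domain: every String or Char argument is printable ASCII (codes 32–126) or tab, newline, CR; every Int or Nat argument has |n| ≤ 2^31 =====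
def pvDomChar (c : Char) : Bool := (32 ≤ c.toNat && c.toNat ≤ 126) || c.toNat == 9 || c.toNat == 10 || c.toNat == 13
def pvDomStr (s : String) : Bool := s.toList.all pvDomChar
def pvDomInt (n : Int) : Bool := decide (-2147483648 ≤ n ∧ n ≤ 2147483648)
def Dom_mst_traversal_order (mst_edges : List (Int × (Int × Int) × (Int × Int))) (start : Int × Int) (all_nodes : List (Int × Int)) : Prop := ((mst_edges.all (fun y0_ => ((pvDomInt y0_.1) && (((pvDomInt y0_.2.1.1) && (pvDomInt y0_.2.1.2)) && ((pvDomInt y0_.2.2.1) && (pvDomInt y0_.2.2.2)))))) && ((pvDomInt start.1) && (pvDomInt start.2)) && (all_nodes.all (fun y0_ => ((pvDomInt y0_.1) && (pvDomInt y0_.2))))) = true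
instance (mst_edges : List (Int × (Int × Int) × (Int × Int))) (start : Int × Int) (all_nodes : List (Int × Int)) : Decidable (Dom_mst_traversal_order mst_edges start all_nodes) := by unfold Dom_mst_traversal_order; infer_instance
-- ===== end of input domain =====

-- B drops A's adjacency dict and recursion entirely: an explicit-stack DFS that scans
-- the edge list for the popped node's incident edges; same visit order (alternative).

-- ===== PORT A =====
-- adjacency build: for weight, n1, n2 in mst_edges: adj[n1].append((weight, n2)); adj[n2].append((weight, n1))
-- (defaultdict(list) append = Dict.modify with default [])
def pvAdjStepA (d : PySem.Dict (Int × Int) (List (Int × (Int × Int)))) (e : Int × (Int × Int) × (Int × Int)) :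
    PySem.Dict (Int × Int) (List (Int × (Int × Int))) :=
  (d.modify e.2.1 [] (· ++ [(e.1, e.2.2)])).modify e.2.2 [] (· ++ [(e.1, e.2.1)])

def pvAdjA (mst_edges : List (Int × (Int × Int) × (Int × Int))) :
    PySem.Dict (Int × Int) (List (Int × (Int × Int))) :=
  mst_edges.foldl pvAdjStepA PySem.Dict.empty

-- sorted(adj[node]): Python compares the (weight, (r, c)) tuples lexicographically
def pvSortedNbrs (adj : PySem.Dict (Int × Int) (List (Int × (Int × Int)))) (n : Int × Int) :
    List (Int × (Int × Int)) :=
  PySem.List.sorted2 (adj.getD n []) (fun p => p.1) (fun p => toLex p.2)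

-- A's trailing loop: for node in all_nodes: if node not in visited: order.append(node)
def pvAppendMissing (s : PySem.Set (Int × Int) × List (Int × Int)) (all_nodes : List (Int × Int)) :
    List (Int × Int) :=
  all_nodes.foldl (fun order node => if PySem.Set.contains s.1 node then order else order ++ [node]) s.2

-- the recursive dfs helper; fuel bounds the recursion depth (each call visits a new
-- node, and at most 2*|edges|+1 nodes ever occur, so the fuel at the call site below
-- is never exhausted)
def pvDfsA (adj : PySem.Dict (Int × Int) (List (Int × (Int × Int)))) :
    Nat → (Int × Int) → PySem.Set (Int × Int) × List (Int × Int) →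
    PySem.Set (Int × Int) × List (Int × Int)
  | 0, _, s => s
  | fuel+1, node, s =>
      (pvSortedNbrs adj node).foldl
        (fun s' p => if PySem.Set.contains s'.1 p.2 then s' else pvDfsA adj fuel p.2 s')
        (PySem.Set.add s.1 node, s.2 ++ [node])

def mst_traversal_order (mst_edges : List (Int × (Int × Int) × (Int × Int))) (start : Int × Int) (all_nodes : List (Int × Int)) : List (Int × Int) :=
  if mst_edges = [] then (if all_nodes.contains start then [start] else all_nodes)
  else
    let adj := pvAdjA mst_edges
    let s := pvDfsA adj (2 * mst_edges.length + 1) start ([], [])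
    pvAppendMissing s all_nodes

-- ===== PORT B =====
-- B's incident-edge scan: nbrs = []; for w, a, b in mst_edges: if a == node: append (w,b); if b == node: append (w,a)
def pvIncident (mst_edges : List (Int × (Int × Int) × (Int × Int))) (node : Int × Int) :
    List (Int × (Int × Int)) :=
  mst_edges.foldl
    (fun nbrs e =>
      let nbrs := if e.2.1 = node then nbrs ++ [(e.1, e.2.2)] else nbrs
      if e.2.2 = node then nbrs ++ [(e.1, e.2.1)] else nbrs)
    []

-- nbrs.sort(): in-place tuple sort, lexicographic
def pvScanNbrs (mst_edges : List (Int × (Int × Int) × (Int × Int))) (node : Int × Int) :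
    List (Int × (Int × Int)) :=
  PySem.List.sorted2 (pvIncident mst_edges node) (fun p => p.1) (fun p => toLex p.2)

-- the while-stack loop; the Lean list's HEAD is the Python list's END (the stack top),
-- so "for pair in reversed(nbrs): stack.append(pair[1])" is the reverse-foldl that
-- conses each pair's node on top.  Fuel bounds the number of pops (at most
-- 1 + total pushed), never exhausted at the call site below.
def pvLoopB (mst_edges : List (Int × (Int × Int) × (Int × Int))) :
    Nat → List (Int × Int) → PySem.Set (Int × Int) × List (Int × Int) →
    PySem.Set (Int × Int) × List (Int × Int)
  | 0, _, s => s
  | _+1, [], s => s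
  | fuel+1, node :: stack, s =>
      if PySem.Set.contains s.1 node then pvLoopB mst_edges fuel stack s
      else pvLoopB mst_edges fuel
        ((pvScanNbrs mst_edges node).reverse.foldl (fun st p => p.2 :: st) stack)
        (PySem.Set.add s.1 node, s.2 ++ [node])

def mst_traversal_order_alt (mst_edges : List (Int × (Int × Int) × (Int × Int))) (start : Int × Int) (all_nodes : List (Int × Int)) : List (Int × Int) :=
  if mst_edges = [] then (if all_nodes.contains start then [start] else all_nodes)
  else
    let s := pvLoopB mst_edges ((2 * mst_edges.length + 2) * (2 * mst_edges.length + 1)) [start] ([], [])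
    s.2 ++ all_nodes.filter (fun n => ¬ PySem.Set.contains s.1 n)

-- ===== PRECONDITION & SPEC =====
def Spec_mst_traversal_order (mst_edges : List (Int × (Int × Int) × (Int × Int))) (start : Int × Int) (all_nodes : List (Int × Int)) (out : List (Int × Int)) : Prop := out = mst_traversal_order_alt mst_edges start all_nodes
instance (mst_edges : List (Int × (Int × Int) × (Int × Int))) (start : Int × Int) (all_nodes : List (Int × Int)) (out : List (Int × Int)) : Decidable (Spec_mst_traversal_order mst_edges start all_nodes out) := by unfold Spec_mst_traversal_order; infer_instance

-- ===== CLAIM (what is proved, stated in full; the proofs are below) =====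
def Claim_equal_mst_traversal_order : Prop := ∀ (mst_edges : List (Int × (Int × Int) × (Int × Int))) (start : Int × Int) (all_nodes : List (Int × Int)), Dom_mst_traversal_order mst_edges start all_nodes → Spec_mst_traversal_order mst_edges start all_nodes (mst_traversal_order mst_edges start all_nodes)

-- ===== LEMMAS AND PROOFS =====

-- proof-only: the adjacency-indexed form of B's stack loop
def pvLoopG (adj : PySem.Dict (Int × Int) (List (Int × (Int × Int)))) :
    Nat → List (Int × Int) → PySem.Set (Int × Int) × List (Int × Int) →
    PySem.Set (Int × Int) × List (Int × Int)
  | 0, _, s => s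
  | _+1, [], s => s
  | fuel+1, node :: stack, s =>
      if PySem.Set.contains s.1 node then pvLoopG adj fuel stack s
      else pvLoopG adj fuel
        ((pvSortedNbrs adj node).reverse.foldl (fun st p => p.2 :: st) stack)
        (PySem.Set.add s.1 node, s.2 ++ [node])

-- proof-only notions: the node pool (start and every edge endpoint), the count of
-- unvisited pool nodes, and the number of adjacency entries owned by unvisited nodes
def pvPool (mst_edges : List (Int × (Int × Int) × (Int × Int))) (start : Int × Int) : List (Int × Int) :=
  start :: mst_edges.flatMap (fun e => [e.2.1, e.2.2])

def pvCnt (pool : List (Int × Int)) (v : PySem.Set (Int × Int)) : Nat :=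
  (pool.map (fun x => if x ∈ v then 0 else 1)).sum

def pvEng (adj : PySem.Dict (Int × Int) (List (Int × (Int × Int)))) (pool : List (Int × Int))
    (v : PySem.Set (Int × Int)) : Nat :=
  (pool.map (fun k => if k ∈ v then 0 else (adj.getD k []).length)).sum

-- the inner for-loop of dfs, over a list of neighbor NODES, with per-call fuel g
def pvRun (adj : PySem.Dict (Int × Int) (List (Int × (Int × Int)))) (g : Nat)
    (ns : List (Int × Int)) (s : PySem.Set (Int × Int) × List (Int × Int)) :
    PySem.Set (Int × Int) × List (Int × Int) :=
  ns.foldl (fun s' m => if PySem.Set.contains s'.1 m then s' else pvDfsA adj g m s') s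

-- B's scan collects exactly A's adjacency list for the node, in the same order
lemma pv_incident_eq_aux (node : Int × Int) :
    ∀ (es : List (Int × (Int × Int) × (Int × Int))) (d : PySem.Dict (Int × Int) (List (Int × (Int × Int)))),
      (es.foldl pvAdjStepA d).getD node []
        = es.foldl
            (fun nbrs e =>
              let nbrs := if e.2.1 = node then nbrs ++ [(e.1, e.2.2)] else nbrs
              if e.2.2 = node then nbrs ++ [(e.1, e.2.1)] else nbrs)
            (d.getD node []) := by
  intro es
  induction es with
  | nil => intro d; simp
  | cons e es ih =>
    intro d
    simp only [List.foldl_cons]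
    rw [ih]
    congr 1
    show (pvAdjStepA d e).getD node [] = _
    unfold pvAdjStepA
    by_cases h2 : e.2.2 = node <;> by_cases h1 : e.2.1 = node
    · simp [PySem.Dict.getD_modify, h1, h2]
    · simp [PySem.Dict.getD_modify, h1, h2, Ne.symm h1]
    · simp [PySem.Dict.getD_modify, h1, h2, Ne.symm h2]
    · simp [PySem.Dict.getD_modify, h1, h2, Ne.symm h1, Ne.symm h2]

lemma pv_incident_eq (es : List (Int × (Int × Int) × (Int × Int))) (node : Int × Int) :
    pvIncident es node = (pvAdjA es).getD node [] := by
  rw [pvAdjA, pv_incident_eq_aux node es PySem.Dict.empty]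
  simp [pvIncident, PySem.Dict.getD_empty]

lemma pv_scanNbrs_eq (es : List (Int × (Int × Int) × (Int × Int))) (node : Int × Int) :
    pvScanNbrs es node = pvSortedNbrs (pvAdjA es) node := by
  rw [pvScanNbrs, pvSortedNbrs, pv_incident_eq]

-- B's loop is the adjacency-indexed loop
lemma pv_loopB_eq_G (es : List (Int × (Int × Int) × (Int × Int))) :
    ∀ (f : Nat) (st : List (Int × Int)) (s : PySem.Set (Int × Int) × List (Int × Int)),
      pvLoopB es f st s = pvLoopG (pvAdjA es) f st s := by
  intro f
  induction f with
  | zero => intro st s; rfl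
  | succ f ih =>
    intro st s
    cases st with
    | nil => rfl
    | cons n st =>
      show (if PySem.Set.contains s.1 n then pvLoopB es f st s else _) = _
      by_cases h : PySem.Set.contains s.1 n
      · simp only [h, if_pos, pvLoopG]
        exact ih st s
      · simp only [h, if_neg, Bool.false_eq_true, not_false_iff, pvLoopG, pv_scanNbrs_eq]
        exact ih _ _

-- A's trailing foldl is order ++ filter
lemma pv_appendMissing_eq (s : PySem.Set (Int × Int) × List (Int × Int)) (all_nodes : List (Int × Int)) :
    pvAppendMissing s all_nodes = s.2 ++ all_nodes.filter (fun n => ¬ PySem.Set.contains s.1 n) := by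
  unfold pvAppendMissing
  have h : ∀ (l : List (Int × Int)) (acc : List (Int × Int)),
      l.foldl (fun order node => if PySem.Set.contains s.1 node then order else order ++ [node]) acc
        = acc ++ l.filter (fun n => ¬ PySem.Set.contains s.1 n) := by
    intro l
    induction l with
    | nil => intro acc; simp
    | cons x t ih =>
      intro acc
      rw [List.foldl_cons]
      by_cases hx : x ∈ s.1
      · rw [if_pos ((PySem.Set.contains_iff _ _).mpr hx), ih, List.filter_cons]
        simp [hx]
      · rw [if_neg (fun h => hx ((PySem.Set.contains_iff _ _).mp h)), ih, List.filter_cons]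
        simp [hx]
  exact h all_nodes s.2

lemma pv_push (l : List (Int × (Int × Int))) (st : List (Int × Int)) :
    l.reverse.foldl (fun st p => p.2 :: st) st = l.map (·.2) ++ st := by
  have h : ∀ (l : List (Int × (Int × Int))) (st : List (Int × Int)),
      l.foldl (fun st p => p.2 :: st) st = l.reverse.map (·.2) ++ st := by
    intro l
    induction l with
    | nil => intro st; simp
    | cons p l ih => intro st; simp [ih]
  simpa using h l.reverse st

lemma pv_dfsA_succ (adj : PySem.Dict (Int × Int) (List (Int × (Int × Int)))) (g : Nat)
    (n : Int × Int) (s : PySem.Set (Int × Int) × List (Int × Int)) :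
    pvDfsA adj (g+1) n s
      = pvRun adj g ((pvSortedNbrs adj n).map (·.2)) (PySem.Set.add s.1 n, s.2 ++ [n]) := by
  simp [pvDfsA, pvRun, List.foldl_map]

lemma pv_loopG_nil (adj : PySem.Dict (Int × Int) (List (Int × (Int × Int)))) (f : Nat)
    (s : PySem.Set (Int × Int) × List (Int × Int)) : pvLoopG adj f [] s = s := by
  cases f <;> simp [pvLoopG]

-- visited only grows
lemma pv_dfsA_mono (adj : PySem.Dict (Int × Int) (List (Int × (Int × Int)))) :
    ∀ (f : Nat) (n : Int × Int) (s : PySem.Set (Int × Int) × List (Int × Int)) (a : Int × Int),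
      a ∈ s.1 → a ∈ (pvDfsA adj f n s).1 := by
  intro f
  induction f with
  | zero => intro n s a ha; simpa [pvDfsA] using ha
  | succ f ih =>
    intro n s a ha
    rw [pv_dfsA_succ]
    have hstep : ∀ (l : List (Int × Int)) (t : PySem.Set (Int × Int) × List (Int × Int)),
        a ∈ t.1 → a ∈ (pvRun adj f l t).1 := by
      intro l
      induction l with
      | nil => intro t ht; simpa [pvRun] using ht
      | cons m l ihl =>
        intro t ht
        show a ∈ (pvRun adj f l (if PySem.Set.contains t.1 m then t else pvDfsA adj f m t)).1
        by_cases hm : PySem.Set.contains t.1 m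
        · simp only [hm, if_pos]
          exact ihl t ht
        · simp only [hm, if_neg, Bool.false_eq_true, not_false_iff]
          exact ihl _ (ih m t a ht)
    exact hstep _ _ (by simp [PySem.Set.mem_add, ha])

lemma pv_run_mono (adj : PySem.Dict (Int × Int) (List (Int × (Int × Int)))) (g : Nat) :
    ∀ (ns : List (Int × Int)) (s : PySem.Set (Int × Int) × List (Int × Int)) (a : Int × Int),
      a ∈ s.1 → a ∈ (pvRun adj g ns s).1 := by
  intro ns
  induction ns with
  | nil => intro s a ha; simpa [pvRun] using ha
  | cons m ns ih =>
    intro s a ha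
    show a ∈ (pvRun adj g ns (if PySem.Set.contains s.1 m then s else pvDfsA adj g m s)).1
    by_cases hm : PySem.Set.contains s.1 m
    · simp only [hm, if_pos]
      exact ih s a ha
    · simp only [hm, if_neg, Bool.false_eq_true, not_false_iff]
      exact ih _ a (pv_dfsA_mono adj g m s a ha)

-- counting lemmas
lemma pv_cnt_le (pool : List (Int × Int)) (v : PySem.Set (Int × Int)) :
    pvCnt pool v ≤ pool.length := by
  induction pool with
  | nil => simp [pvCnt]
  | cons x t ih =>
    simp only [pvCnt, List.map_cons, List.sum_cons, List.length_cons] at ih ⊢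
    split_ifs <;> omega

lemma pv_cnt_pos (pool : List (Int × Int)) (v : PySem.Set (Int × Int)) (n : Int × Int)
    (hn : n ∈ pool) (hnv : n ∉ v) : 1 ≤ pvCnt pool v := by
  revert hn
  induction pool with
  | nil => intro hn; cases hn
  | cons x t ih =>
    intro hn
    simp only [pvCnt, List.map_cons, List.sum_cons] at ih ⊢
    rcases List.mem_cons.mp hn with rfl | hnt
    · rw [if_neg hnv]; omega
    · have := ih hnt; omega

lemma pv_cnt_mono (pool : List (Int × Int)) (v w : PySem.Set (Int × Int))
    (hsub : ∀ a, a ∈ v → a ∈ w) : pvCnt pool w ≤ pvCnt pool v := by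
  induction pool with
  | nil => simp [pvCnt]
  | cons x t ih =>
    simp only [pvCnt, List.map_cons, List.sum_cons] at ih ⊢
    by_cases hv : x ∈ v
    · have hw : x ∈ w := hsub x hv
      rw [if_pos hv, if_pos hw]; omega
    · by_cases hw : x ∈ w
      · rw [if_neg hv, if_pos hw]; omega
      · rw [if_neg hv, if_neg hw]; omega

lemma pv_cnt_add_lt (pool : List (Int × Int)) (v : PySem.Set (Int × Int)) (n : Int × Int)
    (hn : n ∈ pool) (hnv : n ∉ v) : pvCnt pool (PySem.Set.add v n) < pvCnt pool v := by
  revert hn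
  induction pool with
  | nil => intro hn; cases hn
  | cons x t ih =>
    intro hn
    simp only [pvCnt, List.map_cons, List.sum_cons] at ih ⊢
    rcases List.mem_cons.mp hn with rfl | hnt
    · have h1 : n ∈ PySem.Set.add v n := by simp [PySem.Set.mem_add]
      rw [if_pos h1, if_neg hnv]
      have hmono : pvCnt t (PySem.Set.add v n) ≤ pvCnt t v :=
        pv_cnt_mono t v _ (fun a ha => by simp [PySem.Set.mem_add, ha])
      simp only [pvCnt] at hmono
      omega
    · have := ih hnt
      by_cases hxv : x ∈ v
      · have hxa : x ∈ PySem.Set.add v n := by simp [PySem.Set.mem_add, hxv]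
        rw [if_pos hxa, if_pos hxv]; omega
      · by_cases hxn : x = n
        · subst hxn
          have hxa : x ∈ PySem.Set.add v x := by simp [PySem.Set.mem_add]
          rw [if_pos hxa, if_neg hxv]; omega
        · have hxa : x ∉ PySem.Set.add v n := by
            simp only [PySem.Set.mem_add]
            rintro (h | h)
            · exact hxv h
            · exact hxn h
          rw [if_neg hxa, if_neg hxv]; omega

lemma pv_eng_mono (adj : PySem.Dict (Int × Int) (List (Int × (Int × Int))))
    (pool : List (Int × Int)) (v w : PySem.Set (Int × Int))
    (hsub : ∀ a, a ∈ v → a ∈ w) : pvEng adj pool w ≤ pvEng adj pool v := by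
  induction pool with
  | nil => simp [pvEng]
  | cons x t ih =>
    simp only [pvEng, List.map_cons, List.sum_cons] at ih ⊢
    by_cases hv : x ∈ v
    · have hw : x ∈ w := hsub x hv
      rw [if_pos hv, if_pos hw]; omega
    · by_cases hw : x ∈ w
      · rw [if_neg hv, if_pos hw]; omega
      · rw [if_neg hv, if_neg hw]; omega

lemma pv_eng_add_le (adj : PySem.Dict (Int × Int) (List (Int × (Int × Int))))
    (pool : List (Int × Int)) (v : PySem.Set (Int × Int)) (n : Int × Int)
    (hn : n ∈ pool) (hnv : n ∉ v) :
    pvEng adj pool (PySem.Set.add v n) + (adj.getD n []).length ≤ pvEng adj pool v := by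
  revert hn
  induction pool with
  | nil => intro hn; cases hn
  | cons x t ih =>
    intro hn
    simp only [pvEng, List.map_cons, List.sum_cons] at ih ⊢
    rcases List.mem_cons.mp hn with rfl | hnt
    · have h1 : n ∈ PySem.Set.add v n := by simp [PySem.Set.mem_add]
      rw [if_pos h1, if_neg hnv]
      have hmono : pvEng adj t (PySem.Set.add v n) ≤ pvEng adj t v :=
        pv_eng_mono adj t v _ (fun a ha => by simp [PySem.Set.mem_add, ha])
      simp only [pvEng] at hmono
      omega
    · have := ih hnt
      by_cases hxv : x ∈ v
      · have hxa : x ∈ PySem.Set.add v n := by simp [PySem.Set.mem_add, hxv]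
        rw [if_pos hxa, if_pos hxv]; omega
      · by_cases hxn : x = n
        · subst hxn
          have h1 : x ∈ PySem.Set.add v x := by simp [PySem.Set.mem_add]
          rw [if_pos h1, if_neg hxv]
          have hmono : pvEng adj t (PySem.Set.add v x) ≤ pvEng adj t v :=
            pv_eng_mono adj t v _ (fun a ha => by simp [PySem.Set.mem_add, ha])
          simp only [pvEng] at hmono
          omega
        · have hxa : x ∉ PySem.Set.add v n := by
            simp only [PySem.Set.mem_add]
            rintro (h | h)
            · exact hxv h
            · exact hxn h
          rw [if_neg hxa, if_neg hxv]; omega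

lemma pv_eng_bound (adj : PySem.Dict (Int × Int) (List (Int × (Int × Int))))
    (pool : List (Int × Int)) (v : PySem.Set (Int × Int)) (B : Nat)
    (hB : ∀ k, (adj.getD k []).length ≤ B) : pvEng adj pool v ≤ pool.length * B := by
  induction pool with
  | nil => simp [pvEng]
  | cons x t ih =>
    simp only [pvEng, List.map_cons, List.sum_cons, List.length_cons] at ih ⊢
    have hx : (if x ∈ v then 0 else (adj.getD x []).length) ≤ B := by
      split_ifs
      · omega
      · exact hB x
    have hmul : (t.length + 1) * B = t.length * B + B := Nat.succ_mul _ _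
    rw [hmul]
    omega

-- membership / length through one Dict.modify-append step
lemma pv_modify_mem (d : PySem.Dict (Int × Int) (List (Int × (Int × Int)))) (a : Int × Int)
    (y : Int × (Int × Int)) (k : Int × Int) (p : Int × (Int × Int))
    (hp : p ∈ (d.modify a [] (· ++ [y])).getD k []) : p ∈ d.getD k [] ∨ p = y := by
  rw [PySem.Dict.getD_modify] at hp
  split_ifs at hp with h
  · subst h
    rcases List.mem_append.mp hp with h' | h'
    · exact Or.inl h'
    · simp at h'; exact Or.inr h'
  · exact Or.inl hp

lemma pv_modify_len (d : PySem.Dict (Int × Int) (List (Int × (Int × Int)))) (a : Int × Int)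
    (y : Int × (Int × Int)) (k : Int × Int) :
    ((d.modify a [] (· ++ [y])).getD k []).length ≤ (d.getD k []).length + 1 := by
  rw [PySem.Dict.getD_modify]
  split_ifs with h
  · subst h; simp
  · simp

-- neighbors of any node lie in the pool (adjacency closure)
lemma pv_adj_closed_aux (P : (Int × Int) → Prop) :
    ∀ (es : List (Int × (Int × Int) × (Int × Int)))
      (d : PySem.Dict (Int × Int) (List (Int × (Int × Int)))),
      (∀ k p, p ∈ d.getD k [] → P p.2) → (∀ e ∈ es, P e.2.1 ∧ P e.2.2) →
      ∀ k p, p ∈ (es.foldl pvAdjStepA d).getD k [] → P p.2 := by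
  intro es
  induction es with
  | nil => intro d hd _ k p hp; exact hd k p hp
  | cons e es ih =>
    intro d hd hes k p hp
    refine ih (pvAdjStepA d e) ?_ (fun e' he' => hes e' (List.mem_cons_of_mem _ he')) k p hp
    intro k' p' hp'
    have he := hes e (List.mem_cons_self ..)
    have hp'' : p' ∈ ((d.modify e.2.1 [] (· ++ [(e.1, e.2.2)])).modify e.2.2
        [] (· ++ [(e.1, e.2.1)])).getD k' [] := hp'
    rcases pv_modify_mem _ _ _ _ _ hp'' with h | rfl
    · rcases pv_modify_mem _ _ _ _ _ h with h' | rfl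
      · exact hd _ _ h'
      · exact he.2
    · exact he.1

lemma pv_adj_closed (mst_edges : List (Int × (Int × Int) × (Int × Int))) (start : Int × Int) :
    ∀ k p, p ∈ (pvAdjA mst_edges).getD k [] → p.2 ∈ pvPool mst_edges start := by
  apply pv_adj_closed_aux
  · intro k p hp; simp [PySem.Dict.getD_empty] at hp
  · intro e he
    constructor <;>
    · apply List.mem_cons_of_mem
      exact List.mem_flatMap.mpr ⟨e, he, by simp⟩

-- every adjacency list is short: at most two entries per edge
lemma pv_adj_len_aux :
    ∀ (es : List (Int × (Int × Int) × (Int × Int)))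
      (d : PySem.Dict (Int × Int) (List (Int × (Int × Int)))) (k : Int × Int),
      ((es.foldl pvAdjStepA d).getD k []).length ≤ (d.getD k []).length + 2 * es.length := by
  intro es
  induction es with
  | nil => intro d k; simp
  | cons e es ih =>
    intro d k
    have h0 : ((es.foldl pvAdjStepA (pvAdjStepA d e)).getD k []).length
        ≤ ((pvAdjStepA d e).getD k []).length + 2 * es.length := ih _ k
    have h1 := pv_modify_len (d.modify e.2.1 [] (· ++ [(e.1, e.2.2)])) e.2.2 (e.1, e.2.1) k
    have h2 := pv_modify_len d e.2.1 (e.1, e.2.2) k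
    have h3 : ((pvAdjStepA d e).getD k []).length
        ≤ (d.getD k []).length + 2 := le_trans h1 (by omega)
    simp only [List.foldl_cons, List.length_cons]
    calc ((es.foldl pvAdjStepA (pvAdjStepA d e)).getD k []).length
        ≤ ((pvAdjStepA d e).getD k []).length + 2 * es.length := h0
      _ ≤ (d.getD k []).length + 2 * (es.length + 1) := by omega

lemma pv_adj_len (mst_edges : List (Int × (Int × Int) × (Int × Int))) (k : Int × Int) :
    ((pvAdjA mst_edges).getD k []).length ≤ 2 * mst_edges.length := by
  have := pv_adj_len_aux mst_edges PySem.Dict.empty k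
  simpa [pvAdjA, PySem.Dict.getD_empty] using this

lemma pv_pool_len (mst_edges : List (Int × (Int × Int) × (Int × Int))) (start : Int × Int) :
    (pvPool mst_edges start).length = 2 * mst_edges.length + 1 := by
  have h : ∀ (es : List (Int × (Int × Int) × (Int × Int))),
      (es.flatMap (fun e => [e.2.1, e.2.2])).length = 2 * es.length := by
    intro es
    induction es with
    | nil => simp
    | cons e es ih => simp [ih]; omega
  simp [pvPool, h]

lemma pv_sortedNbrs_len (adj : PySem.Dict (Int × Int) (List (Int × (Int × Int)))) (n : Int × Int) :
    (pvSortedNbrs adj n).length = (adj.getD n []).length :=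
  (PySem.List.sorted2_perm _ _ _ _).length_eq

lemma pv_sortedNbrs_mem (adj : PySem.Dict (Int × Int) (List (Int × (Int × Int)))) (n : Int × Int)
    (p : Int × (Int × Int)) (hp : p ∈ pvSortedNbrs adj n) : p ∈ adj.getD n [] :=
  (PySem.List.sorted2_perm _ _ _ _).mem_iff.mp hp

-- A-side fuel stability: any two sufficient fuels give the same dfs result
lemma pv_dfsA_stab (adj : PySem.Dict (Int × Int) (List (Int × (Int × Int))))
    (pool : List (Int × Int))
    (Hcl : ∀ k p, p ∈ adj.getD k [] → p.2 ∈ pool) :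
    ∀ (f g : Nat) (n : Int × Int) (s : PySem.Set (Int × Int) × List (Int × Int)),
      n ∈ pool → n ∉ s.1 → pvCnt pool s.1 ≤ f → pvCnt pool s.1 ≤ g →
      pvDfsA adj f n s = pvDfsA adj g n s := by
  intro f
  induction f with
  | zero =>
    intro g n s hn hns hf _
    have := pv_cnt_pos pool s.1 n hn hns
    omega
  | succ f ih =>
    intro g n s hn hns hf hg
    have hg1 : 1 ≤ g := le_trans (pv_cnt_pos pool s.1 n hn hns) hg
    obtain ⟨g', rfl⟩ : ∃ g', g = g' + 1 := ⟨g - 1, by omega⟩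
    rw [pv_dfsA_succ, pv_dfsA_succ]
    have hcntadd : pvCnt pool (PySem.Set.add s.1 n) < pvCnt pool s.1 :=
      pv_cnt_add_lt pool s.1 n hn hns
    have hrun : ∀ (l : List (Int × Int)) (t : PySem.Set (Int × Int) × List (Int × Int)),
        (∀ x ∈ l, x ∈ pool) → pvCnt pool t.1 ≤ f → pvCnt pool t.1 ≤ g' →
        pvRun adj f l t = pvRun adj g' l t := by
      intro l
      induction l with
      | nil => intro t _ _ _; simp [pvRun]
      | cons m l ihl =>
        intro t hl htf htg
        show pvRun adj f l (if PySem.Set.contains t.1 m then t else pvDfsA adj f m t)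
          = pvRun adj g' l (if PySem.Set.contains t.1 m then t else pvDfsA adj g' m t)
        by_cases hm : PySem.Set.contains t.1 m
        · simp only [hm, if_pos]
          exact ihl t (fun x hx => hl x (List.mem_cons_of_mem _ hx)) htf htg
        · have hmv : m ∉ t.1 := fun h => hm ((PySem.Set.contains_iff _ _).mpr h)
          have heq : pvDfsA adj f m t = pvDfsA adj g' m t :=
            ih g' m t (hl m (List.mem_cons_self ..)) hmv htf htg
          simp only [hm, if_neg, Bool.false_eq_true, not_false_iff, heq]
          refine ihl _ (fun x hx => hl x (List.mem_cons_of_mem _ hx)) ?_ ?_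
          · exact le_trans (pv_cnt_mono pool t.1 _
              (fun a ha => pv_dfsA_mono adj g' m t a ha)) htf
          · exact le_trans (pv_cnt_mono pool t.1 _
              (fun a ha => pv_dfsA_mono adj g' m t a ha)) htg
    apply hrun
    · intro x hx
      obtain ⟨p, hp, rfl⟩ := List.mem_map.mp hx
      exact Hcl n p (pv_sortedNbrs_mem adj n p hp)
    · show pvCnt pool (PySem.Set.add s.1 n) ≤ f; omega
    · show pvCnt pool (PySem.Set.add s.1 n) ≤ g'; omega

lemma pv_run_stab (adj : PySem.Dict (Int × Int) (List (Int × (Int × Int))))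
    (pool : List (Int × Int))
    (Hcl : ∀ k p, p ∈ adj.getD k [] → p.2 ∈ pool) :
    ∀ (ns : List (Int × Int)) (g g' : Nat) (s : PySem.Set (Int × Int) × List (Int × Int)),
      (∀ x ∈ ns, x ∈ pool) → pvCnt pool s.1 ≤ g → pvCnt pool s.1 ≤ g' →
      pvRun adj g ns s = pvRun adj g' ns s := by
  intro ns
  induction ns with
  | nil => intro g g' s _ _ _; simp [pvRun]
  | cons m ns ih =>
    intro g g' s hns hg hg'
    show pvRun adj g ns (if PySem.Set.contains s.1 m then s else pvDfsA adj g m s)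
      = pvRun adj g' ns (if PySem.Set.contains s.1 m then s else pvDfsA adj g' m s)
    by_cases hm : PySem.Set.contains s.1 m
    · simp only [hm, if_pos]
      exact ih g g' s (fun x hx => hns x (List.mem_cons_of_mem _ hx)) hg hg'
    · have hmv : m ∉ s.1 := fun h => hm ((PySem.Set.contains_iff _ _).mpr h)
      have heq : pvDfsA adj g m s = pvDfsA adj g' m s :=
        pv_dfsA_stab adj pool Hcl g g' m s (hns m (List.mem_cons_self ..)) hmv hg hg'
      simp only [hm, if_neg, Bool.false_eq_true, not_false_iff, heq]
      refine ih g g' _ (fun x hx => hns x (List.mem_cons_of_mem _ hx)) ?_ ?_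
      · exact le_trans (pv_cnt_mono pool s.1 _ (fun a ha => pv_dfsA_mono adj g' m s a ha)) hg
      · exact le_trans (pv_cnt_mono pool s.1 _ (fun a ha => pv_dfsA_mono adj g' m s a ha)) hg'

-- G-side fuel stability
lemma pv_loopG_stab (adj : PySem.Dict (Int × Int) (List (Int × (Int × Int))))
    (pool : List (Int × Int))
    (Hcl : ∀ k p, p ∈ adj.getD k [] → p.2 ∈ pool) :
    ∀ (f g : Nat) (st : List (Int × Int)) (s : PySem.Set (Int × Int) × List (Int × Int)),
      (∀ x ∈ st, x ∈ pool) →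
      st.length + pvEng adj pool s.1 < f → st.length + pvEng adj pool s.1 < g →
      pvLoopG adj f st s = pvLoopG adj g st s := by
  intro f
  induction f with
  | zero => intro g st s _ hf _; omega
  | succ f ih =>
    intro g st s hst hf hg
    obtain ⟨g', rfl⟩ : ∃ g', g = g' + 1 := ⟨g - 1, by omega⟩
    cases st with
    | nil => rw [pv_loopG_nil, pv_loopG_nil]
    | cons n st =>
      show (if PySem.Set.contains s.1 n then pvLoopG adj f st s else _)
        = (if PySem.Set.contains s.1 n then pvLoopG adj g' st s else _)
      by_cases hn : PySem.Set.contains s.1 n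
      · simp only [hn, if_pos]
        refine ih g' st s (fun x hx => hst x (List.mem_cons_of_mem _ hx)) ?_ ?_ <;>
          (simp only [List.length_cons] at hf hg; omega)
      · have hnv : n ∉ s.1 := fun h => hn ((PySem.Set.contains_iff _ _).mpr h)
        have hnp : n ∈ pool := hst n (List.mem_cons_self ..)
        simp only [hn, if_neg, Bool.false_eq_true, not_false_iff, pv_push]
        have hlen : ((pvSortedNbrs adj n).map (·.2)).length = (adj.getD n []).length := by
          rw [List.length_map, pv_sortedNbrs_len]
        have hengadd := pv_eng_add_le adj pool s.1 n hnp hnv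
        refine ih g' _ _ ?_ ?_ ?_
        · intro x hx
          rcases List.mem_append.mp hx with h | h
          · obtain ⟨p, hp, rfl⟩ := List.mem_map.mp h
            exact Hcl n p (pv_sortedNbrs_mem adj n p hp)
          · exact hst x (List.mem_cons_of_mem _ h)
        · show (((pvSortedNbrs adj n).map (·.2)) ++ st).length
            + pvEng adj pool (PySem.Set.add s.1 n) < f
          simp only [List.length_append, hlen]
          simp only [List.length_cons] at hf
          omega
        · show (((pvSortedNbrs adj n).map (·.2)) ++ st).length
            + pvEng adj pool (PySem.Set.add s.1 n) < g'
          simp only [List.length_append, hlen]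
          simp only [List.length_cons] at hg
          omega

-- the bridge: running the explicit stack on ns ++ rest equals first doing A's
-- recursive inner loop on ns, then continuing the stack on rest
lemma pv_bridge (adj : PySem.Dict (Int × Int) (List (Int × (Int × Int))))
    (pool : List (Int × Int))
    (Hcl : ∀ k p, p ∈ adj.getD k [] → p.2 ∈ pool) :
    ∀ (k : Nat) (ns rest : List (Int × Int)) (s : PySem.Set (Int × Int) × List (Int × Int))
      (f1 f2 : Nat),
      (∀ x ∈ ns, x ∈ pool) → (∀ x ∈ rest, x ∈ pool) → pvCnt pool s.1 ≤ k →
      (ns ++ rest).length + pvEng adj pool s.1 < f1 →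
      rest.length + pvEng adj pool s.1 < f2 →
      pvLoopG adj f1 (ns ++ rest) s = pvLoopG adj f2 rest (pvRun adj pool.length ns s) := by
  intro k
  induction k using Nat.strong_induction_on with
  | _ k ihk =>
  intro ns
  induction ns with
  | nil =>
    intro rest s f1 f2 _ hrest hk hf1 hf2
    simp only [List.nil_append] at hf1 ⊢
    have hr : pvRun adj pool.length [] s = s := rfl
    rw [hr]
    exact pv_loopG_stab adj pool Hcl f1 f2 rest s hrest hf1 hf2
  | cons n ns ihns =>
    intro rest s f1 f2 hns hrest hk hf1 hf2
    have hnp : n ∈ pool := hns n (List.mem_cons_self ..)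
    obtain ⟨f1', rfl⟩ : ∃ m, f1 = m + 1 := ⟨f1 - 1, by omega⟩
    simp only [List.cons_append, List.length_cons, List.length_append] at hf1
    have hpoolpos : 1 ≤ pool.length := List.length_pos_of_mem hnp
    obtain ⟨G', hG⟩ : ∃ m, pool.length = m + 1 := ⟨pool.length - 1, by omega⟩
    have hsubnr : ∀ x ∈ ns ++ rest, x ∈ pool := by
      intro x hx
      rcases List.mem_append.mp hx with h | h
      · exact hns x (List.mem_cons_of_mem _ h)
      · exact hrest x h
    show pvLoopG adj (f1' + 1) (n :: (ns ++ rest)) s = _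
    by_cases hv : PySem.Set.contains s.1 n
    · -- already visited: both sides skip n
      have hL : pvLoopG adj (f1' + 1) (n :: (ns ++ rest)) s = pvLoopG adj f1' (ns ++ rest) s := by
        show (if PySem.Set.contains s.1 n then pvLoopG adj f1' (ns ++ rest) s else _) = _
        simp only [hv, if_pos]
      rw [hL]
      have hstab : pvLoopG adj f1' (ns ++ rest) s = pvLoopG adj (f1' + 1) (ns ++ rest) s := by
        refine pv_loopG_stab adj pool Hcl f1' (f1' + 1) (ns ++ rest) s hsubnr ?_ ?_ <;>
          (simp only [List.length_append]; omega)
      rw [hstab]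
      rw [ihns rest s (f1' + 1) f2 (fun x hx => hns x (List.mem_cons_of_mem _ hx)) hrest hk
        (by simp only [List.length_append]; omega) hf2]
      congr 1
      show pvRun adj pool.length ns s = pvRun adj pool.length (n :: ns) s
      have hrun1 : pvRun adj pool.length (n :: ns) s
          = pvRun adj pool.length ns
            (if PySem.Set.contains s.1 n then s else pvDfsA adj pool.length n s) := rfl
      rw [hrun1]
      simp only [hv, if_pos]
    · -- unvisited: A recurses into n, B pushes n's neighbors
      have hnv : n ∉ s.1 := fun hmem => hv ((PySem.Set.contains_iff _ _).mpr hmem)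
      have hcntadd : pvCnt pool (PySem.Set.add s.1 n) < pvCnt pool s.1 :=
        pv_cnt_add_lt pool s.1 n hnp hnv
      have hklt : pvCnt pool (PySem.Set.add s.1 n) < k := lt_of_lt_of_le hcntadd hk
      have hengadd := pv_eng_add_le adj pool s.1 n hnp hnv
      have hnbpool : ∀ x ∈ (pvSortedNbrs adj n).map (·.2), x ∈ pool := by
        intro x hx
        obtain ⟨p, hp, rfl⟩ := List.mem_map.mp hx
        exact Hcl n p (pv_sortedNbrs_mem adj n p hp)
      have hnblen : ((pvSortedNbrs adj n).map (·.2)).length = (adj.getD n []).length := by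
        rw [List.length_map, pv_sortedNbrs_len]
      have hL : pvLoopG adj (f1' + 1) (n :: (ns ++ rest)) s
          = pvLoopG adj f1' ((pvSortedNbrs adj n).map (·.2) ++ (ns ++ rest))
              (PySem.Set.add s.1 n, s.2 ++ [n]) := by
        show (if PySem.Set.contains s.1 n then _
          else pvLoopG adj f1'
            ((pvSortedNbrs adj n).reverse.foldl (fun st p => p.2 :: st) (ns ++ rest))
            (PySem.Set.add s.1 n, s.2 ++ [n])) = _
        simp only [hv, if_neg, Bool.false_eq_true, not_false_iff]
        rw [pv_push]
      rw [hL]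
      have h2 := ihk _ hklt ((pvSortedNbrs adj n).map (·.2)) (ns ++ rest)
        (PySem.Set.add s.1 n, s.2 ++ [n]) f1' (f1' + 1) hnbpool hsubnr (le_refl _)
        (by show ((pvSortedNbrs adj n).map (·.2) ++ (ns ++ rest)).length
              + pvEng adj pool (PySem.Set.add s.1 n) < f1'
            simp only [List.length_append, hnblen]
            omega)
        (by show (ns ++ rest).length + pvEng adj pool (PySem.Set.add s.1 n) < f1' + 1
            simp only [List.length_append]
            omega)
      rw [h2]
      have hs2sub : ∀ a, a ∈ PySem.Set.add s.1 n
          → a ∈ (pvRun adj pool.length ((pvSortedNbrs adj n).map (·.2))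
                (PySem.Set.add s.1 n, s.2 ++ [n])).1 :=
        fun a ha => pv_run_mono adj pool.length _ _ a ha
      have hcnt2 : pvCnt pool (pvRun adj pool.length ((pvSortedNbrs adj n).map (·.2))
            (PySem.Set.add s.1 n, s.2 ++ [n])).1 ≤ pvCnt pool (PySem.Set.add s.1 n) :=
        pv_cnt_mono pool _ _ hs2sub
      have heng2 : pvEng adj pool (pvRun adj pool.length ((pvSortedNbrs adj n).map (·.2))
            (PySem.Set.add s.1 n, s.2 ++ [n])).1 ≤ pvEng adj pool (PySem.Set.add s.1 n) :=
        pv_eng_mono adj pool _ _ hs2sub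
      have h3 := ihk _ hklt ns rest
        (pvRun adj pool.length ((pvSortedNbrs adj n).map (·.2))
          (PySem.Set.add s.1 n, s.2 ++ [n])) (f1' + 1) f2
        (fun x hx => hns x (List.mem_cons_of_mem _ hx)) hrest hcnt2
        (by simp only [List.length_append]; omega)
        (by omega)
      rw [h3]
      congr 1
      show pvRun adj pool.length ns _ = pvRun adj pool.length (n :: ns) s
      have hrun1 : pvRun adj pool.length (n :: ns) s
          = pvRun adj pool.length ns
            (if PySem.Set.contains s.1 n then s else pvDfsA adj pool.length n s) := rfl
      rw [hrun1]
      simp only [hv, if_neg, Bool.false_eq_true, not_false_iff]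
      congr 1
      have hdfs : pvDfsA adj pool.length n s
          = pvRun adj G' ((pvSortedNbrs adj n).map (·.2))
              (PySem.Set.add s.1 n, s.2 ++ [n]) := by
        rw [hG]
        exact pv_dfsA_succ adj G' n s
      rw [hdfs]
      have hcle := pv_cnt_le pool s.1
      exact pv_run_stab adj pool Hcl ((pvSortedNbrs adj n).map (·.2)) pool.length G'
        (PySem.Set.add s.1 n, s.2 ++ [n]) hnbpool
        (by show pvCnt pool (PySem.Set.add s.1 n) ≤ pool.length; omega)
        (by show pvCnt pool (PySem.Set.add s.1 n) ≤ G'; omega)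

-- main: B's edge-scanning explicit-stack loop computes exactly A's recursive dfs
lemma pv_main (mst_edges : List (Int × (Int × Int) × (Int × Int))) (start : Int × Int) :
    pvLoopB mst_edges ((2 * mst_edges.length + 2) * (2 * mst_edges.length + 1))
      [start] ([], [])
      = pvDfsA (pvAdjA mst_edges) (2 * mst_edges.length + 1) start ([], []) := by
  rw [pv_loopB_eq_G]
  set adj := pvAdjA mst_edges with hadj
  set pool := pvPool mst_edges start with hpool
  have Hcl : ∀ k p, p ∈ adj.getD k [] → p.2 ∈ pool := pv_adj_closed mst_edges start
  have hplen : pool.length = 2 * mst_edges.length + 1 := pv_pool_len mst_edges start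
  have hstart : start ∈ pool := List.mem_cons_self ..
  have hengb : pvEng adj pool ([] : PySem.Set (Int × Int)) ≤ pool.length * (2 * mst_edges.length) :=
    pv_eng_bound adj pool _ _ (fun k => pv_adj_len mst_edges k)
  set L := mst_edges.length with hL
  have hFbig : ([start] ++ []).length + pvEng adj pool ([] : PySem.Set (Int × Int))
      < (2 * L + 2) * (2 * L + 1) := by
    have h1 : pool.length * (2 * L) = (2 * L + 1) * (2 * L) := by rw [hplen]
    have h2 : (2 * L + 2) * (2 * L + 1) = (2 * L + 1) * (2 * L) + (4 * L + 2) := by ring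
    simp only [List.length_append, List.length_cons, List.length_nil]
    omega
  have hb := pv_bridge adj pool Hcl (pvCnt pool ([] : PySem.Set (Int × Int)))
    [start] [] (([] : PySem.Set (Int × Int)), ([] : List (Int × Int)))
    ((2 * L + 2) * (2 * L + 1)) (pvEng adj pool ([] : PySem.Set (Int × Int)) + 1)
    (by intro x hx; simp at hx; subst hx; exact hstart)
    (by intro x hx; simp at hx)
    (le_refl _) hFbig (by simp)
  simp only [List.append_nil] at hb
  rw [hb, pv_loopG_nil]
  have hrun : pvRun adj pool.length [start] (([] : PySem.Set (Int × Int)), ([] : List (Int × Int)))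
      = pvDfsA adj pool.length start (([] : PySem.Set (Int × Int)), ([] : List (Int × Int))) := by
    show (if PySem.Set.contains (([] : PySem.Set (Int × Int))) start
        then (([] : PySem.Set (Int × Int)), ([] : List (Int × Int)))
        else pvDfsA adj pool.length start
          (([] : PySem.Set (Int × Int)), ([] : List (Int × Int)))) = _
    rw [if_neg (by simp [PySem.Set.contains_iff])]
  rw [hrun, hplen]

-- ===== VERDICT (by name: the statement is the Claim_ definition above) =====
theorem mst_traversal_order_spec : Claim_equal_mst_traversal_order := by
  intro mst_edges start all_nodes _
  unfold Spec_mst_traversal_order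
  by_cases h : mst_edges = []
  · simp [mst_traversal_order, mst_traversal_order_alt, h]
  · simp only [mst_traversal_order, mst_traversal_order_alt, if_neg h]
    rw [pv_main, pv_appendMissing_eq]
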